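-- pv_equiv track=rewrite | github.com/OkashaRehman/PolyMentor | src/reasoning_engine/error_classifier.py | get_primary_error
-- ===== SOURCE A (Python) =====
-- def get_primary_error(error_labels: list) -> str:
--     """Return the most important error to address first."""
--     priority = [
--         "syntax_error",
--         "type_error",
--         "null_reference",
--         "division_by_zero",
--         "off_by_one",
--         "infinite_loop",
--         "logical_error",
--         "structural_issue",
--         "bad_practice",
--     ]
--     for p in priority:
--         if p in error_labels:
--             return p
--     return error_labels[0] if error_labels else "unknown"
-- ===== SOURCE B (Python) =====
-- def get_primary_error(error_labels: list) -> str: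
--     """Return the most important error to address first."""
--     priority = [
--         "syntax_error",
--         "type_error",
--         "null_reference",
--         "division_by_zero",
--         "off_by_one",
--         "infinite_loop",
--         "logical_error",
--         "structural_issue",
--         "bad_practice",
--     ]
--     rank = {p: i for i, p in enumerate(priority)}
--     best = None  # (rank, label) with the smallest rank seen so far
--     for lbl in error_labels:
--         r = rank.get(lbl)
--         if r is not None and (best is None or r < best[0]):
--             best = (r, lbl)
--     if best is not None:
--         return best[1]
--     return error_labels[0] if error_labels else "unknown"
-- ===== Notes on version B (the rewrite author's own statement) =====
-- stated objective: idiomatic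
-- what changed: Instead of scanning the fixed priority list and membership-testing error_labels for each entry, B builds a label-to-rank dict once and makes a single pass over error_labels keeping the label with the smallest rank (strict < so the earliest-priority label wins), with the same fallback.
import Mathlib
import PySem

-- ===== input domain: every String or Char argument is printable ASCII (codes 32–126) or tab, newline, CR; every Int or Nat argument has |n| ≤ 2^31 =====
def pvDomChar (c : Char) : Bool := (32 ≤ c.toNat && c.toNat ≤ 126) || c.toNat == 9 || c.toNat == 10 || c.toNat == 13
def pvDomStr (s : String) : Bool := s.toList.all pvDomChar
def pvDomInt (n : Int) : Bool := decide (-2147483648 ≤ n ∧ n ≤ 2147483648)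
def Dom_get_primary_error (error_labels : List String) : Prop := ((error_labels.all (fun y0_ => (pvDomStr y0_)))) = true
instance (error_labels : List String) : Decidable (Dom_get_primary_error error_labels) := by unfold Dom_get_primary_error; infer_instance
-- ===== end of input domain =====

-- B replaces A's "scan the priority list, membership-test the labels" with one pass over the
-- labels maintaining the minimum rank looked up in a dict built once (idiomatic/alternative).

-- ===== PORT A =====
def pvPriorityA : List String := [
    "syntax_error",
    "type_error",
    "null_reference",
    "division_by_zero",
    "off_by_one",
    "infinite_loop",
    "logical_error",
    "structural_issue",
    "bad_practice"
  ]

-- the for-loop over `priority` with an early `return`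
def pvLoopA (labels : List String) : List String → Option String
  | [] => none
  | p :: ps => if p ∈ labels then some p else pvLoopA labels ps

def get_primary_error (error_labels : List String) : String :=
  match pvLoopA error_labels pvPriorityA with
  | some p => p
  | none => match error_labels with
    | [] => "unknown"
    | h :: _ => h

-- ===== PORT B =====
def pvPriorityB : List String := [
    "syntax_error",
    "type_error",
    "null_reference",
    "division_by_zero",
    "off_by_one",
    "infinite_loop",
    "logical_error",
    "structural_issue",
    "bad_practice"
  ]

-- rank = {p: i for i, p in enumerate(priority)}
def pvRankB : PySem.Dict String Int :=
  (PySem.List.enumerate pvPriorityB).foldl (fun d ip => d.insert ip.2 ip.1) PySem.Dict.empty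

-- body of the for-loop over error_labels: keep the (rank, label) pair with the smallest rank
def pvStepB (best : Option (Int × String)) (lbl : String) : Option (Int × String) :=
  match pvRankB.get? lbl with
  | none => best
  | some r => match best with
    | none => some (r, lbl)
    | some b => if r < b.1 then some (r, lbl) else best

def get_primary_error_alt (error_labels : List String) : String :=
  match error_labels.foldl pvStepB none with
  | some b => b.2
  | none => match error_labels with
    | [] => "unknown"
    | h :: _ => h

-- ===== PRECONDITION & SPEC =====
def Spec_get_primary_error (error_labels : List String) (out : String) : Prop := out = get_primary_error_alt error_labels
instance (error_labels : List String) (out : String) : Decidable (Spec_get_primary_error error_labels out) := by unfold Spec_get_primary_error; infer_instance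

-- ===== CLAIM (what is proved, stated in full; the proofs are below) =====
def Claim_equal_get_primary_error : Prop := ∀ (error_labels : List String), Dom_get_primary_error error_labels → Spec_get_primary_error error_labels (get_primary_error error_labels)

-- ===== LEMMAS AND PROOFS =====

-- the label at a given rank
def pvPrAt (r : Int) : String := pvPriorityA.getD r.toNat ""

-- the minimum rank among the ranked labels of ls, starting from r
def pvMfold (r : Int) (ls : List String) : Int :=
  ls.foldl (fun a l => match pvRankB.get? l with | none => a | some j => min a j) r

lemma pvRankB_lit : pvRankB = PySem.Dict.mk [("syntax_error", (0 : Int)), ("type_error", (1 : Int)), ("null_reference", (2 : Int)), ("division_by_zero", (3 : Int)), ("off_by_one", (4 : Int)), ("infinite_loop", (5 : Int)), ("logical_error", (6 : Int)), ("structural_issue", (7 : Int)), ("bad_practice", (8 : Int))] := by decide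

lemma pvRank_some {l : String} {r : Int} (h : pvRankB.get? l = some r) :
    0 ≤ r ∧ r < 9 ∧ l = pvPrAt r := by
  rw [pvRankB_lit] at h
  simp only [PySem.Dict.get?_mk_cons, beq_iff_eq] at h
  split_ifs at h with h0 h1 h2 h3 h4 h5 h6 h7 h8
  · injection h with hr; subst hr; subst h0; exact ⟨by norm_num, by norm_num, by decide⟩
  · injection h with hr; subst hr; subst h1; exact ⟨by norm_num, by norm_num, by decide⟩
  · injection h with hr; subst hr; subst h2; exact ⟨by norm_num, by norm_num, by decide⟩
  · injection h with hr; subst hr; subst h3; exact ⟨by norm_num, by norm_num, by decide⟩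
  · injection h with hr; subst hr; subst h4; exact ⟨by norm_num, by norm_num, by decide⟩
  · injection h with hr; subst hr; subst h5; exact ⟨by norm_num, by norm_num, by decide⟩
  · injection h with hr; subst hr; subst h6; exact ⟨by norm_num, by norm_num, by decide⟩
  · injection h with hr; subst hr; subst h7; exact ⟨by norm_num, by norm_num, by decide⟩
  · injection h with hr; subst hr; subst h8; exact ⟨by norm_num, by norm_num, by decide⟩
  · rw [show (PySem.Dict.mk ([] : List (String × Int))).get? l = none from rfl] at h
    cases h

lemma pvMfold_le_start (ls : List String) : ∀ r : Int, pvMfold r ls ≤ r := by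
  induction ls with
  | nil => intro r; simp [pvMfold]
  | cons l tl ih =>
    intro r
    cases h : pvRankB.get? l with
    | none => simpa [pvMfold, List.foldl_cons, h] using ih r
    | some j =>
      have he : pvMfold r (l :: tl) = pvMfold (min r j) tl := by
        simp [pvMfold, List.foldl_cons, h]
      rw [he]
      exact le_trans (ih (min r j)) (min_le_left _ _)

lemma pvMfold_mem (ls : List String) :
    ∀ r : Int, pvMfold r ls = r ∨ ∃ l ∈ ls, pvRankB.get? l = some (pvMfold r ls) := by
  induction ls with
  | nil => intro r; left; simp [pvMfold]
  | cons l tl ih =>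
    intro r
    cases h : pvRankB.get? l with
    | none =>
      have he : pvMfold r (l :: tl) = pvMfold r tl := by simp [pvMfold, List.foldl_cons, h]
      rcases ih r with h1 | ⟨l', hl', hr'⟩
      · left; rw [he, h1]
      · right; exact ⟨l', List.mem_cons_of_mem _ hl', by rw [he]; exact hr'⟩
    | some j =>
      have he : pvMfold r (l :: tl) = pvMfold (min r j) tl := by
        simp [pvMfold, List.foldl_cons, h]
      rcases ih (min r j) with h1 | ⟨l', hl', hr'⟩
      · rcases min_choice r j with hm | hm
        · left; rw [he, h1, hm]
        · right
          refine ⟨l, List.mem_cons_self, ?_⟩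
          rw [he, h1, hm, h]
      · right; exact ⟨l', List.mem_cons_of_mem _ hl', by rw [he]; exact hr'⟩

lemma pvMfold_min (ls : List String) :
    ∀ r : Int, ∀ l ∈ ls, ∀ j : Int, pvRankB.get? l = some j → pvMfold r ls ≤ j := by
  induction ls with
  | nil => intro r l hl; cases hl
  | cons l0 tl ih =>
    intro r l hl j hj
    cases h : pvRankB.get? l0 with
    | none =>
      have he : pvMfold r (l0 :: tl) = pvMfold r tl := by simp [pvMfold, List.foldl_cons, h]
      rcases List.mem_cons.mp hl with rfl | hl'
      · rw [h] at hj; cases hj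
      · rw [he]; exact ih r l hl' j hj
    | some j0 =>
      have he : pvMfold r (l0 :: tl) = pvMfold (min r j0) tl := by
        simp [pvMfold, List.foldl_cons, h]
      rcases List.mem_cons.mp hl with rfl | hl'
      · rw [h] at hj; injection hj with hj; subst hj
        rw [he]
        exact le_trans (pvMfold_le_start tl _) (min_le_right _ _)
      · rw [he]; exact ih (min r j0) l hl' j hj

lemma pvFold_eq (ls : List String) :
    ∀ r : Int, ls.foldl pvStepB (some (r, pvPrAt r)) =
      some (pvMfold r ls, pvPrAt (pvMfold r ls)) := by
  induction ls with
  | nil => intro r; simp [pvMfold]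
  | cons l tl ih =>
    intro r
    cases h : pvRankB.get? l with
    | none =>
      have he : pvMfold r (l :: tl) = pvMfold r tl := by simp [pvMfold, List.foldl_cons, h]
      rw [he]
      simpa [List.foldl_cons, pvStepB, h] using ih r
    | some j =>
      obtain ⟨-, -, hl⟩ := pvRank_some h
      have he : pvMfold r (l :: tl) = pvMfold (min r j) tl := by
        simp [pvMfold, List.foldl_cons, h]
      rw [he]
      by_cases hjr : j < r
      · have hm : min r j = j := by omega
        rw [hm]
        have hst : pvStepB (some (r, pvPrAt r)) l = some (j, pvPrAt j) := by
          simp [pvStepB, h, hjr, ← hl]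
        rw [List.foldl_cons, hst]
        exact ih j
      · have hm : min r j = r := by omega
        rw [hm]
        have hst : pvStepB (some (r, pvPrAt r)) l = some (r, pvPrAt r) := by
          simp [pvStepB, h, hjr]
        rw [List.foldl_cons, hst]
        exact ih r

lemma pvFold_none (ls : List String) (h : ∀ l ∈ ls, pvRankB.get? l = none) :
    ls.foldl pvStepB none = none := by
  induction ls with
  | nil => rfl
  | cons l tl ih =>
    have h0 := h l List.mem_cons_self
    rw [List.foldl_cons, show pvStepB none l = none from by simp [pvStepB, h0]]
    exact ih fun l' hl' => h l' (List.mem_cons_of_mem _ hl')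

lemma pvFold_none_start (ls : List String)
    (hx : ∃ l ∈ ls, ∃ j : Int, pvRankB.get? l = some j) :
    ∃ m : Int, ls.foldl pvStepB none = some (m, pvPrAt m) ∧
      (∃ l ∈ ls, pvRankB.get? l = some m) ∧
      (∀ l ∈ ls, ∀ j : Int, pvRankB.get? l = some j → m ≤ j) := by
  induction ls with
  | nil => simp at hx
  | cons l tl ih =>
    cases h : pvRankB.get? l with
    | none =>
      have hfc : (l :: tl).foldl pvStepB none = tl.foldl pvStepB none := by
        simp [List.foldl_cons, pvStepB, h]
      have hx' : ∃ l' ∈ tl, ∃ j : Int, pvRankB.get? l' = some j := by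
        obtain ⟨l', hl', j', hj'⟩ := hx
        rcases List.mem_cons.mp hl' with rfl | hmem
        · rw [h] at hj'; cases hj'
        · exact ⟨l', hmem, j', hj'⟩
      obtain ⟨m, hf, ⟨l', hl', hm'⟩, hmin⟩ := ih hx'
      refine ⟨m, by rw [hfc]; exact hf, ⟨l', List.mem_cons_of_mem _ hl', hm'⟩, ?_⟩
      intro l2 hl2 j hj
      rcases List.mem_cons.mp hl2 with rfl | hmem
      · rw [h] at hj; cases hj
      · exact hmin l2 hmem j hj
    | some j =>
      obtain ⟨-, -, hl⟩ := pvRank_some h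
      have hfc : (l :: tl).foldl pvStepB none = tl.foldl pvStepB (some (j, pvPrAt j)) := by
        rw [List.foldl_cons, show pvStepB none l = some (j, l) from by simp [pvStepB, h], hl]
      refine ⟨pvMfold j tl, by rw [hfc]; exact pvFold_eq tl j, ?_, ?_⟩
      · rcases pvMfold_mem tl j with h1 | ⟨l', hl', hr'⟩
        · exact ⟨l, List.mem_cons_self, by rw [h1, h]⟩
        · exact ⟨l', List.mem_cons_of_mem _ hl', hr'⟩
      · intro l2 hl2 j2 hj2
        rcases List.mem_cons.mp hl2 with rfl | hmem
        · rw [h] at hj2; injection hj2 with hj2; subst hj2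
          exact pvMfold_le_start tl j
        · exact pvMfold_min tl j l2 hmem j2 hj2

lemma pvA_of_min (labels : List String) (m : Int)
    (hmem : ∃ l ∈ labels, pvRankB.get? l = some m)
    (hmin : ∀ l ∈ labels, ∀ j : Int, pvRankB.get? l = some j → m ≤ j) :
    pvLoopA labels pvPriorityA = some (pvPrAt m) := by
  obtain ⟨l, hl0, hrl⟩ := hmem
  obtain ⟨hm0, hm9, hlp⟩ := pvRank_some hrl
  subst hlp
  have h0 : "syntax_error" ∈ labels → m ≤ 0 := fun h => hmin _ h 0 (by decide)
  have h1 : "type_error" ∈ labels → m ≤ 1 := fun h => hmin _ h 1 (by decide)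
  have h2 : "null_reference" ∈ labels → m ≤ 2 := fun h => hmin _ h 2 (by decide)
  have h3 : "division_by_zero" ∈ labels → m ≤ 3 := fun h => hmin _ h 3 (by decide)
  have h4 : "off_by_one" ∈ labels → m ≤ 4 := fun h => hmin _ h 4 (by decide)
  have h5 : "infinite_loop" ∈ labels → m ≤ 5 := fun h => hmin _ h 5 (by decide)
  have h6 : "logical_error" ∈ labels → m ≤ 6 := fun h => hmin _ h 6 (by decide)
  have h7 : "structural_issue" ∈ labels → m ≤ 7 := fun h => hmin _ h 7 (by decide)
  have h8 : "bad_practice" ∈ labels → m ≤ 8 := fun h => hmin _ h 8 (by decide)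
  interval_cases m
  · have hk : "syntax_error" ∈ labels := by simpa [pvPrAt, pvPriorityA] using hl0
    have hres : pvLoopA labels pvPriorityA = some "syntax_error" := by
      simp [pvLoopA, pvPriorityA,  hk]
    rw [hres]; decide
  · have hk : "type_error" ∈ labels := by simpa [pvPrAt, pvPriorityA] using hl0
    have n0 : "syntax_error" ∉ labels := fun h => absurd (h0 h) (by norm_num)
    have hres : pvLoopA labels pvPriorityA = some "type_error" := by
      simp [pvLoopA, pvPriorityA, n0, hk]
    rw [hres]; decide
  · have hk : "null_reference" ∈ labels := by simpa [pvPrAt, pvPriorityA] using hl0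
    have n0 : "syntax_error" ∉ labels := fun h => absurd (h0 h) (by norm_num)
    have n1 : "type_error" ∉ labels := fun h => absurd (h1 h) (by norm_num)
    have hres : pvLoopA labels pvPriorityA = some "null_reference" := by
      simp [pvLoopA, pvPriorityA, n0, n1, hk]
    rw [hres]; decide
  · have hk : "division_by_zero" ∈ labels := by simpa [pvPrAt, pvPriorityA] using hl0
    have n0 : "syntax_error" ∉ labels := fun h => absurd (h0 h) (by norm_num)
    have n1 : "type_error" ∉ labels := fun h => absurd (h1 h) (by norm_num)
    have n2 : "null_reference" ∉ labels := fun h => absurd (h2 h) (by norm_num)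
    have hres : pvLoopA labels pvPriorityA = some "division_by_zero" := by
      simp [pvLoopA, pvPriorityA, n0, n1, n2, hk]
    rw [hres]; decide
  · have hk : "off_by_one" ∈ labels := by simpa [pvPrAt, pvPriorityA] using hl0
    have n0 : "syntax_error" ∉ labels := fun h => absurd (h0 h) (by norm_num)
    have n1 : "type_error" ∉ labels := fun h => absurd (h1 h) (by norm_num)
    have n2 : "null_reference" ∉ labels := fun h => absurd (h2 h) (by norm_num)
    have n3 : "division_by_zero" ∉ labels := fun h => absurd (h3 h) (by norm_num)
    have hres : pvLoopA labels pvPriorityA = some "off_by_one" := by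
      simp [pvLoopA, pvPriorityA, n0, n1, n2, n3, hk]
    rw [hres]; decide
  · have hk : "infinite_loop" ∈ labels := by simpa [pvPrAt, pvPriorityA] using hl0
    have n0 : "syntax_error" ∉ labels := fun h => absurd (h0 h) (by norm_num)
    have n1 : "type_error" ∉ labels := fun h => absurd (h1 h) (by norm_num)
    have n2 : "null_reference" ∉ labels := fun h => absurd (h2 h) (by norm_num)
    have n3 : "division_by_zero" ∉ labels := fun h => absurd (h3 h) (by norm_num)
    have n4 : "off_by_one" ∉ labels := fun h => absurd (h4 h) (by norm_num)
    have hres : pvLoopA labels pvPriorityA = some "infinite_loop" := by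
      simp [pvLoopA, pvPriorityA, n0, n1, n2, n3, n4, hk]
    rw [hres]; decide
  · have hk : "logical_error" ∈ labels := by simpa [pvPrAt, pvPriorityA] using hl0
    have n0 : "syntax_error" ∉ labels := fun h => absurd (h0 h) (by norm_num)
    have n1 : "type_error" ∉ labels := fun h => absurd (h1 h) (by norm_num)
    have n2 : "null_reference" ∉ labels := fun h => absurd (h2 h) (by norm_num)
    have n3 : "division_by_zero" ∉ labels := fun h => absurd (h3 h) (by norm_num)
    have n4 : "off_by_one" ∉ labels := fun h => absurd (h4 h) (by norm_num)
    have n5 : "infinite_loop" ∉ labels := fun h => absurd (h5 h) (by norm_num)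
    have hres : pvLoopA labels pvPriorityA = some "logical_error" := by
      simp [pvLoopA, pvPriorityA, n0, n1, n2, n3, n4, n5, hk]
    rw [hres]; decide
  · have hk : "structural_issue" ∈ labels := by simpa [pvPrAt, pvPriorityA] using hl0
    have n0 : "syntax_error" ∉ labels := fun h => absurd (h0 h) (by norm_num)
    have n1 : "type_error" ∉ labels := fun h => absurd (h1 h) (by norm_num)
    have n2 : "null_reference" ∉ labels := fun h => absurd (h2 h) (by norm_num)
    have n3 : "division_by_zero" ∉ labels := fun h => absurd (h3 h) (by norm_num)
    have n4 : "off_by_one" ∉ labels := fun h => absurd (h4 h) (by norm_num)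
    have n5 : "infinite_loop" ∉ labels := fun h => absurd (h5 h) (by norm_num)
    have n6 : "logical_error" ∉ labels := fun h => absurd (h6 h) (by norm_num)
    have hres : pvLoopA labels pvPriorityA = some "structural_issue" := by
      simp [pvLoopA, pvPriorityA, n0, n1, n2, n3, n4, n5, n6, hk]
    rw [hres]; decide
  · have hk : "bad_practice" ∈ labels := by simpa [pvPrAt, pvPriorityA] using hl0
    have n0 : "syntax_error" ∉ labels := fun h => absurd (h0 h) (by norm_num)
    have n1 : "type_error" ∉ labels := fun h => absurd (h1 h) (by norm_num)
    have n2 : "null_reference" ∉ labels := fun h => absurd (h2 h) (by norm_num)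
    have n3 : "division_by_zero" ∉ labels := fun h => absurd (h3 h) (by norm_num)
    have n4 : "off_by_one" ∉ labels := fun h => absurd (h4 h) (by norm_num)
    have n5 : "infinite_loop" ∉ labels := fun h => absurd (h5 h) (by norm_num)
    have n6 : "logical_error" ∉ labels := fun h => absurd (h6 h) (by norm_num)
    have n7 : "structural_issue" ∉ labels := fun h => absurd (h7 h) (by norm_num)
    have hres : pvLoopA labels pvPriorityA = some "bad_practice" := by
      simp [pvLoopA, pvPriorityA, n0, n1, n2, n3, n4, n5, n6, n7, hk]
    rw [hres]; decide

lemma pvMain (labels : List String) :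
    get_primary_error labels = get_primary_error_alt labels := by
  by_cases hx : ∀ l ∈ labels, pvRankB.get? l = none
  · have hB : labels.foldl pvStepB none = none := pvFold_none labels hx
    have hA : pvLoopA labels pvPriorityA = none := by
      have n0 : "syntax_error" ∉ labels := fun h => by
        have hh := hx _ h
        rw [show pvRankB.get? "syntax_error" = some 0 from by decide] at hh
        cases hh
      have n1 : "type_error" ∉ labels := fun h => by
        have hh := hx _ h
        rw [show pvRankB.get? "type_error" = some 1 from by decide] at hh
        cases hh
      have n2 : "null_reference" ∉ labels := fun h => by
        have hh := hx _ h
        rw [show pvRankB.get? "null_reference" = some 2 from by decide] at hh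
        cases hh
      have n3 : "division_by_zero" ∉ labels := fun h => by
        have hh := hx _ h
        rw [show pvRankB.get? "division_by_zero" = some 3 from by decide] at hh
        cases hh
      have n4 : "off_by_one" ∉ labels := fun h => by
        have hh := hx _ h
        rw [show pvRankB.get? "off_by_one" = some 4 from by decide] at hh
        cases hh
      have n5 : "infinite_loop" ∉ labels := fun h => by
        have hh := hx _ h
        rw [show pvRankB.get? "infinite_loop" = some 5 from by decide] at hh
        cases hh
      have n6 : "logical_error" ∉ labels := fun h => by
        have hh := hx _ h
        rw [show pvRankB.get? "logical_error" = some 6 from by decide] at hh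
        cases hh
      have n7 : "structural_issue" ∉ labels := fun h => by
        have hh := hx _ h
        rw [show pvRankB.get? "structural_issue" = some 7 from by decide] at hh
        cases hh
      have n8 : "bad_practice" ∉ labels := fun h => by
        have hh := hx _ h
        rw [show pvRankB.get? "bad_practice" = some 8 from by decide] at hh
        cases hh
      simp [pvLoopA, pvPriorityA, n0, n1, n2, n3, n4, n5, n6, n7, n8]
    simp [get_primary_error, get_primary_error_alt, hA, hB]
  · push Not at hx
    obtain ⟨l0, hl0, hne⟩ := hx
    obtain ⟨j0, hj0⟩ : ∃ j : Int, pvRankB.get? l0 = some j := by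
      cases hq : pvRankB.get? l0 with
      | none => exact absurd hq hne
      | some j => exact ⟨j, rfl⟩
    obtain ⟨m, hfold, hmem, hmin⟩ := pvFold_none_start labels ⟨l0, hl0, j0, hj0⟩
    have hA := pvA_of_min labels m hmem hmin
    simp [get_primary_error, get_primary_error_alt, hA, hfold]

-- ===== VERDICT (by name: the statement is the Claim_ definition above) =====
theorem get_primary_error_spec : Claim_equal_get_primary_error := by
  intro labels _
  unfold Spec_get_primary_error
  exact pvMain labels
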